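-- pv_equiv track=rewrite | github.com/tomy807/codingtest | 우테코/test4.py | solution
-- ===== SOURCE A (Python) =====
-- from collections import deque
--
-- def solution(s):
--     queue=deque(s)
--     count=1
--     answer = []
--     while queue:
--         out=queue.popleft()
--         if queue:
--             if out==queue[0]:
--                 count+=1
--             else:
--                 answer.append(count)
--                 count=1
--         elif out==s[0]:
--             answer[0]+=count
--         else:
--             answer.append(count)
--     answer.sort(reverse=False)
--     return answer
-- ===== SOURCE B (Python) =====
-- def solution(s):
--     n = len(s)
--     if n == 0:
--         return []
--     cuts = [i for i in range(1, n) if s[i] != s[i - 1]]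
--     groups = [b - a for a, b in zip([0] + cuts, cuts + [n])]
--     if s[0] == s[-1]:
--         groups[0] += groups.pop()
--     return sorted(groups)
-- ===== Notes on version B (the rewrite author's own statement) =====
-- stated objective: alternative
-- what changed: A folds run-counting, the wrap-around merge and sorting into one stateful deque loop; B is a three-phase pipeline: collect the boundary indices where adjacent characters differ via a comprehension, derive run lengths as differences of consecutive boundaries with zip, then apply the wrap-around merge as a separate post-processing step before sorting.
import Mathlib
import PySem

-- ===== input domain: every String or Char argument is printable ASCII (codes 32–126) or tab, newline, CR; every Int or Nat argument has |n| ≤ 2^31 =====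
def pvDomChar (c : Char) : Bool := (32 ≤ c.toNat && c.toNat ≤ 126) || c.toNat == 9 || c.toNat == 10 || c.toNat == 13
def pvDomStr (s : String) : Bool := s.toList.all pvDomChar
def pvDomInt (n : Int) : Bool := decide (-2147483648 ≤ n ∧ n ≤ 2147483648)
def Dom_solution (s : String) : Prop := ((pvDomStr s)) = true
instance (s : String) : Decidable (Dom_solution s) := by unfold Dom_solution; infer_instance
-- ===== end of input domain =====

-- B replaces A's single stateful deque loop (run counting + inline wrap-merge) by a
-- three-phase pipeline: boundary indices, run lengths as differences, then a separate
-- wrap-merge step before sorting (objective: alternative decomposition, not speed).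

-- ===== PORT A =====
-- the while loop over the deque: queue, count, answer are the loop state; s0 = s[0]
def solAAux (s0 : Char) : List Char → Int → List Int → List Int
  | [], _, answer => answer
  | out :: rest, count, answer =>
    match rest with
    | q0 :: _ =>
      if out == q0 then solAAux s0 rest (count + 1) answer
      else solAAux s0 rest 1 (answer ++ [count])
    | [] =>
      if out == s0 then
        match answer with
        | a :: t => (a + count) :: t       -- answer[0] += count
        | [] => []                          -- Python raises IndexError here (excluded by Pre_)
      else answer ++ [count]

def solution (s : String) : List Int :=
  let l := s.toList
  let answer :=
    match l with
    | [] => []                              -- empty deque: the while loop never runs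
    | c :: cs => solAAux c (c :: cs) 1 []
  PySem.List.sorted answer (fun x => x) false

-- ===== PORT B =====
def solution_alt (s : String) : List Int :=
  let l := s.toList
  let n : Int := l.length
  if n == 0 then []
  else
    let cuts : List Int :=
      (PySem.List.pyRange 1 n 1).filter
        (fun i => !(PySem.List.pyGet? l i == PySem.List.pyGet? l (i - 1)))
    let groups : List Int :=
      (((0 : Int) :: cuts).zip (cuts ++ [n])).map (fun p => p.2 - p.1)
    if PySem.List.pyGet? l 0 == PySem.List.pyGet? l (-1) then
      match groups.dropLast with
      | [] => []                            -- groups.pop() left []; groups[0] = … raises IndexError (excluded by Pre_)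
      | g0 :: rest => PySem.List.sorted ((g0 + groups.getLastD 0) :: rest) (fun x => x) false
    else PySem.List.sorted groups (fun x => x) false

-- ===== PRECONDITION & SPEC =====
-- On a nonempty string whose characters are all equal, both Pythons raise IndexError
-- (A's answer[0] += count on an empty answer; B's groups[0] += groups.pop() on a
-- singleton groups), so exactly those inputs are excluded.
def Pre_solution (s : String) : Prop :=
  s.toList = [] ∨ ¬ (s.toList.all (fun c => c == s.toList.headD ' ') = true)
instance (s : String) : Decidable (Pre_solution s) := by unfold Pre_solution; infer_instance
def pvWitness_solution : String := "ab"

def Spec_solution (s : String) (out : List Int) : Prop := out = solution_alt s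
instance (s : String) (out : List Int) : Decidable (Spec_solution s out) := by unfold Spec_solution; infer_instance

-- ===== CLAIM (what is proved, stated in full; the proofs are below) =====
def Claim_equal_solution : Prop := ∀ (s : String), Dom_solution s → Pre_solution s → Spec_solution s (solution s)

-- ===== LEMMAS AND PROOFS =====

-- canonical run lengths of a list, from the left
def runLens : List Char → List Int
  | [] => []
  | [_] => [1]
  | a :: b :: t =>
    match runLens (b :: t) with
    | [] => []
    | r :: rs => if a = b then (r + 1) :: rs else 1 :: r :: rs

-- add k to the head (Python's answer[0] += k, [] where Python raises)
def bumpHead (k : Int) : List Int → List Int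
  | [] => []
  | a :: t => (a + k) :: t

-- cut positions of l, as distances: k ∈ cutsNat l ↔ l[k] ≠ l[k+1]
def cutsNat (l : List Char) : List Nat :=
  (List.range (l.length - 1)).filter (fun k => !(l[k + 1]? == l[k]?))

-- consecutive differences of p :: cs :: [n]
def diffs : Int → List Int → Int → List Int
  | p, [], n => [n - p]
  | p, c :: cs, n => (c - p) :: diffs c cs n

theorem runLens_ne_nil : ∀ (a : Char) (l : List Char), runLens (a :: l) ≠ []
  | _, [] => by simp [runLens]
  | a, b :: t => by
    have h2 := runLens_ne_nil b t
    simp only [runLens]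
    rcases h : runLens (b :: t) with _ | ⟨r, rs⟩
    · exact absurd h h2
    · simp only []; split <;> simp_all

theorem solAAux_eq : ∀ (s0 : Char) (q : List Char) (hq : q ≠ []) (count : Int) (answer : List Int),
    solAAux s0 q count answer =
      (if q.getLast hq = s0 then
        bumpHead ((bumpHead (count - 1) (runLens q)).getLastD 0)
          (answer ++ (bumpHead (count - 1) (runLens q)).dropLast)
      else answer ++ bumpHead (count - 1) (runLens q))
  | s0, [out], _, count, answer => by
    have e : 1 + (count - 1) = count := by ring
    cases answer <;> simp [solAAux, runLens, bumpHead, e]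
  | s0, out :: q0 :: t, _, count, answer => by
    have hne : q0 :: t ≠ [] := by simp
    have IH1 := solAAux_eq s0 (q0 :: t) hne (count + 1) answer
    have IH2 := solAAux_eq s0 (q0 :: t) hne 1 (answer ++ [count])
    rcases hr : runLens (q0 :: t) with _ | ⟨r, rs⟩
    · exact absurd hr (runLens_ne_nil q0 t)
    rw [hr] at IH1 IH2
    have hlast : (out :: q0 :: t).getLast (by simp) = (q0 :: t).getLast hne :=
      List.getLast_cons hne
    have step : solAAux s0 (out :: q0 :: t) count answer =
        if out == q0 then solAAux s0 (q0 :: t) (count + 1) answer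
        else solAAux s0 (q0 :: t) 1 (answer ++ [count]) := rfl
    have hrl : runLens (out :: q0 :: t) =
        if out = q0 then (r + 1) :: rs else 1 :: r :: rs := by
      simp only [runLens, hr]
    rw [step, hrl, hlast]
    by_cases hob : out = q0
    · have e : r + (count + 1 - 1) = r + 1 + (count - 1) := by ring
      rw [if_pos (by simp [hob]), if_pos hob, IH1]
      simp only [bumpHead, e]
    · have e0 : r + (1 - 1) = r := by ring
      have e1 : 1 + (count - 1) = count := by ring
      rw [if_neg (by simp [hob]), if_neg hob, IH2]
      simp only [bumpHead, e0, e1, List.dropLast_cons₂, List.getLastD_cons,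
        List.append_assoc, List.cons_append, List.nil_append]

theorem zip_diffs (cs : List Int) (p n : Int) :
    ((p :: cs).zip (cs ++ [n])).map (fun q => q.2 - q.1) = diffs p cs n := by
  induction cs generalizing p with
  | nil => simp [diffs]
  | cons c cs ih => simp [diffs, ih]

theorem diffs_shift (cs : List Int) (p n : Int) :
    diffs (p + 1) (cs.map (· + 1)) (n + 1) = diffs p cs n := by
  induction cs generalizing p with
  | nil => simp [diffs]
  | cons c cs ih =>
    simp only [List.map_cons, diffs, ih]
    ring_nf

theorem cutsNat_cons_cons (a b : Char) (t : List Char) :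
    cutsNat (a :: b :: t) = (if a = b then [] else [0]) ++ (cutsNat (b :: t)).map (· + 1) := by
  simp only [cutsNat, List.length_cons, Nat.add_sub_cancel, List.range_succ_eq_map,
    List.filter_cons, List.filter_map]
  simp only [List.getElem?_cons_succ, List.getElem?_cons_zero, Function.comp_def]
  by_cases hab : a = b
  · simp [hab]
  · simp [hab, Ne.symm hab]

theorem diffs_cutsNat : ∀ (l : List Char), l ≠ [] →
    diffs 0 ((cutsNat l).map (fun k => Int.ofNat k + 1)) (l.length : Int) = runLens l
  | [_], _ => by simp [cutsNat, diffs, runLens]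
  | a :: b :: t, _ => by
    have IH := diffs_cutsNat (b :: t) (by simp)
    have hcomp : (cutsNat (a :: b :: t)).map (fun k => Int.ofNat k + 1)
        = (if a = b then [] else [1])
          ++ ((cutsNat (b :: t)).map (fun k => Int.ofNat k + 1)).map (· + 1) := by
      rw [cutsNat_cons_cons, List.map_append]
      congr 1
      · by_cases hab : a = b <;> simp [hab]
      · simp only [List.map_map]
        apply List.map_congr_left
        intro k _
        simp only [Function.comp_apply, Int.ofNat_eq_natCast]
        push_cast
        omega
    have hlen : ((a :: b :: t).length : Int) = ((b :: t).length : Int) + 1 := by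
      simp
    rw [hcomp, hlen]
    by_cases hab : a = b
    · rw [if_pos hab]
      rcases hms : (cutsNat (b :: t)).map (fun k => Int.ofNat k + 1) with _ | ⟨c, cs⟩
      · rw [hms] at IH
        simp only [diffs] at IH
        simp only [List.nil_append, List.map_nil, runLens, ← IH, hab]
        simp [diffs]
      · rw [hms] at IH
        simp only [List.nil_append, List.map_cons, diffs, diffs_shift] at IH ⊢
        simp only [runLens, ← IH, hab]
        norm_num
    · rw [if_neg hab]
      rcases hr : runLens (b :: t) with _ | ⟨r, rs⟩
      · exact absurd hr (runLens_ne_nil b t)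
      have hshift := diffs_shift ((cutsNat (b :: t)).map (fun k => Int.ofNat k + 1)) 0
        ((b :: t).length : Int)
      simp only [List.cons_append, List.nil_append, diffs, zero_add] at hshift ⊢
      rw [hshift, IH, hr]
      simp only [runLens, hr, hab]
      norm_num

theorem cutsB_eq (l : List Char) :
    (PySem.List.pyRange 1 (l.length : Int) 1).filter
        (fun i => !(PySem.List.pyGet? l i == PySem.List.pyGet? l (i - 1)))
      = (cutsNat l).map (fun k => Int.ofNat k + 1) := by
  rw [PySem.List.pyRange_one]
  have ht : ((l.length : Int) - 1).toNat = l.length - 1 := by omega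
  rw [ht, List.filter_map]
  unfold cutsNat
  have hp : ∀ k ∈ List.range (l.length - 1),
      ((fun i => !(PySem.List.pyGet? l i == PySem.List.pyGet? l (i - 1))) ∘
        (fun k : Nat => (1 : Int) + ↑k)) k = (fun k => !(l[k + 1]? == l[k]?)) k := by
    intro k _
    simp only [Function.comp_apply]
    have e1 : (1 : Int) + (k : Int) = ((k + 1 : Nat) : Int) := by push_cast; ring
    have e2 : ((k + 1 : Nat) : Int) - 1 = ((k : Nat) : Int) := by push_cast; ring
    rw [e1, e2, PySem.List.pyGet?_natCast, PySem.List.pyGet?_natCast]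
  rw [List.filter_congr hp]
  apply List.map_congr_left
  intro k _
  simp only [Int.ofNat_eq_natCast]
  ring

-- ===== VERDICT (by name: the statement is the Claim_ definition above) =====
theorem bumpHead_zero (xs : List Int) : bumpHead (1 - 1) xs = xs := by
  rcases xs with _ | ⟨r, rs⟩ <;> simp [bumpHead]

theorem solution_spec : Claim_equal_solution := by
  intro s _ _
  unfold Spec_solution solution solution_alt
  rcases hl : s.toList with _ | ⟨c, cs⟩
  · simp [PySem.List.sorted]
  · have hq : c :: cs ≠ [] := by simp
    have hA := solAAux_eq c (c :: cs) hq 1 []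
    rw [bumpHead_zero] at hA
    have hn : ((((c :: cs).length : Int)) == 0) = false := by simp; omega
    have hgroups : ∀ cuts : List Int,
        cuts = (cutsNat (c :: cs)).map (fun k => Int.ofNat k + 1) →
        (((0 : Int) :: cuts).zip (cuts ++ [((c :: cs).length : Int)])).map
          (fun p => p.2 - p.1) = runLens (c :: cs) := by
      intro cuts hc
      rw [hc, zip_diffs, diffs_cutsNat _ hq]
    simp only [hn, Bool.false_eq_true, if_false, hA]
    rw [hgroups _ (cutsB_eq (c :: cs)), PySem.List.pyGet?_zero_cons,
      PySem.List.pyGet?_neg_one, List.getLast?_eq_some_getLast hq]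
    have hbeq : (some c == some ((c :: cs).getLast hq))
        = decide (c = (c :: cs).getLast hq) := by
      simp only [Bool.beq_eq_decide_eq, Option.some.injEq]
    rw [hbeq]
    by_cases hcg : (c :: cs).getLast hq = c
    · rw [if_pos hcg, if_pos (by simp [hcg])]
      rcases hd : (runLens (c :: cs)).dropLast with _ | ⟨g0, rest⟩
      · simp [bumpHead, PySem.List.sorted]
      · simp [bumpHead]
    · rw [if_neg hcg, if_neg (by simp; exact fun h => hcg h.symm)]
      simp
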